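-- pv_equiv track=rewrite | github.com/bc-writings/drafts | math/arithmetic/product-cons-int-&-int-num-pigeon-hole/coding/pigeon-hole-old-POC.py | sf_coef
-- ===== SOURCE A (Python) =====
-- def sf_coef(candidates):
--     if candidates:
--         a = candidates.pop()
--
--         yield a
--
--         for b in sf_coef(candidates):
--             if a != 1:
--                 yield b
--
--             yield a*b
-- ===== SOURCE B (Python) =====
-- def sf_coef(candidates):
--     # Iterative rebuild, front-to-back; empties candidates like A (but eagerly).
--     seq = []
--     while candidates:
--         a = candidates.pop(0)
--         new = [a]
--         for b in seq:
--             if a != 1: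
--                 new.append(b)
--             new.append(a * b)
--         seq = new
--     yield from seq
-- ===== Notes on version B (the rewrite author's own statement) =====
-- stated objective: alternative
-- what changed: Replaces A's recursion that pops the last element and interleaves the recursive generator with a forward iterative loop that pops from the front and rebuilds the running sequence, yielding it all at the end (return-value equivalent; both empty the input list, B eagerly).
import Mathlib
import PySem

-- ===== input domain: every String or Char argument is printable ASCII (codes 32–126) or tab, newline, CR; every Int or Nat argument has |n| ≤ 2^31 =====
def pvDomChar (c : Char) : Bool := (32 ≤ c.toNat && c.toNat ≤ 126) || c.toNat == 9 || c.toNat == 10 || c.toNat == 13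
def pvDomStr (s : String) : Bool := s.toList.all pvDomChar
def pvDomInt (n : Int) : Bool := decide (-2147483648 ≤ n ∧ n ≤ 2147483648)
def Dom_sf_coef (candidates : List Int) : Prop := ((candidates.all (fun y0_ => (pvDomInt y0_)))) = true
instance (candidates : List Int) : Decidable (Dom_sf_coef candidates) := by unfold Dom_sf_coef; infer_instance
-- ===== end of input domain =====

-- B replaces A's end-popping recursion by a forward iterative fold (objective: alternative
-- decomposition, same cost). Equivalence is about the yielded sequence; both Pythons empty the
-- input list, but A pops it gradually while B empties it eagerly on the first next().

-- ===== PORT A =====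
-- A pops the LAST element, yields it, then interleaves the recursive sequence on the rest.
def sf_coef (candidates : List Int) : List Int :=
  match h : candidates.getLast? with
  | none => []
  | some a =>
      a :: (sf_coef candidates.dropLast).flatMap
        (fun b => (if a ≠ 1 then [b] else []) ++ [a * b])
termination_by candidates.length
decreasing_by
  cases candidates with
  | nil => simp at h
  | cons x xs => simp [List.length_dropLast]

-- ===== PORT B =====
-- B consumes the candidates front-to-back, maintaining the running sequence.
def sf_coef_alt (candidates : List Int) : List Int :=
  candidates.foldl
    (fun seq a =>
      a :: seq.flatMap (fun b => (if a ≠ 1 then [b] else []) ++ [a * b]))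
    []

-- ===== PRECONDITION & SPEC =====
def Spec_sf_coef (candidates : List Int) (out : List Int) : Prop := out = sf_coef_alt candidates
instance (candidates : List Int) (out : List Int) : Decidable (Spec_sf_coef candidates out) := by unfold Spec_sf_coef; infer_instance

-- ===== CLAIM (what is proved, stated in full; the proofs are below) =====
def Claim_equal_sf_coef : Prop := ∀ (candidates : List Int), Dom_sf_coef candidates → Spec_sf_coef candidates (sf_coef candidates)

-- ===== LEMMAS AND PROOFS =====

theorem sf_coef_concat (cs : List Int) (a : Int) :
    sf_coef (cs ++ [a])
      = a :: (sf_coef cs).flatMap (fun b => (if a ≠ 1 then [b] else []) ++ [a * b]) := by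
  rw [sf_coef]
  split
  · next h => simp [List.getLast?_concat] at h
  · next b h =>
      rw [List.getLast?_concat] at h
      cases h
      simp

theorem sf_coef_eq_alt (cs : List Int) : sf_coef cs = sf_coef_alt cs := by
  induction cs using List.reverseRecOn with
  | nil => simp [sf_coef, sf_coef_alt]
  | append_singleton cs a ih =>
      rw [sf_coef_concat, ih]
      simp [sf_coef_alt]

-- ===== VERDICT (by name: the statement is the Claim_ definition above) =====
theorem sf_coef_spec : Claim_equal_sf_coef := by
  intro cs _
  unfold Spec_sf_coef
  exact sf_coef_eq_alt cs
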